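-- pv_equiv track=rewrite | github.com/vertexcover-io/notion-cli | src/notion_cli/client.py | prioritize_columns
-- ===== SOURCE A (Python) =====
-- from typing import Any
--
-- def prioritize_columns(properties: dict[str, Any]) -> list[str]:
--     """Prioritize columns based on importance and type."""
--     # Define priority levels
--     high_priority = []
--     medium_priority = []
--     low_priority = []
--     hidden_types = {
--         "created_by",
--         "last_edited_by",
--         "created_time",
--         "last_edited_time",
--     }
--
--     for prop_name, prop_data in properties.items():
--         prop_type = prop_data.get("type", "")
--         prop_name_lower = prop_name.lower()
--
--         # Skip hidden types
--         if prop_type in hidden_types: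
--             continue
--
--         # High priority: title-like properties
--         if prop_type == "title" or prop_name_lower in {
--             "name",
--             "title",
--             "task",
--             "item",
--             "entry",
--         }:
--             high_priority.append(prop_name)
--
--         # High priority: status-like properties
--         elif prop_type in {"status", "select"} and prop_name_lower in {
--             "status",
--             "state",
--             "stage",
--             "phase",
--             "priority",
--         }:
--             high_priority.append(prop_name)
--
--         # Medium priority: important data types
--         elif prop_type in {"date", "number", "checkbox", "people", "multi_select"}:
--             medium_priority.append(prop_name)
--
--         # Medium priority: common important names
--         elif prop_name_lower in {
--             "assignee",
--             "owner",
--             "due",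
--             "deadline",
--             "tags",
--             "category",
--             "type",
--         }:
--             medium_priority.append(prop_name)
--
--         # Low priority: everything else
--         else:
--             low_priority.append(prop_name)
--
--     # Combine in priority order
--     return high_priority + medium_priority + low_priority
-- ===== SOURCE B (Python) =====
-- from typing import Any
--
-- HIDDEN = {"created_by", "last_edited_by", "created_time", "last_edited_time"}
-- HIGH_NAMES = {"name", "title", "task", "item", "entry"}
-- STATUS_NAMES = {"status", "state", "stage", "phase", "priority"}
-- MEDIUM_NAMES = {"assignee", "owner", "due", "deadline", "tags", "category", "type"}
--
--
-- def _type_rank(t: str) -> int: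
--     if t == "title":
--         return 0
--     if t in {"date", "number", "checkbox", "people", "multi_select"}:
--         return 1
--     return 2
--
--
-- def _name_rank(nl: str, t: str) -> int:
--     if nl in HIGH_NAMES:
--         return 0
--     if nl in STATUS_NAMES and t in {"status", "select"}:
--         return 0
--     if nl in MEDIUM_NAMES:
--         return 1
--     return 2
--
--
-- def prioritize_columns(properties: dict[str, Any]) -> list[str]:
--     """Prioritize columns: rank = min(type rank, name rank), then one stable sort."""
--     keyed = []
--     for name, data in properties.items():
--         t = data.get("type", "")
--         if t in HIDDEN:
--             continue
--         keyed.append((min(_type_rank(t), _name_rank(name.lower(), t)), name))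
--     keyed.sort(key=lambda p: p[0])
--     return [name for _, name in keyed]
-- ===== Notes on version B (the rewrite author's own statement) =====
-- stated objective: alternative
-- what changed: Replaces A's elif cascade with three append-buckets by an arithmetic classification (rank = min of an independent type-rank table and a name-rank table) followed by one stable sort on the rank.
import Mathlib
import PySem

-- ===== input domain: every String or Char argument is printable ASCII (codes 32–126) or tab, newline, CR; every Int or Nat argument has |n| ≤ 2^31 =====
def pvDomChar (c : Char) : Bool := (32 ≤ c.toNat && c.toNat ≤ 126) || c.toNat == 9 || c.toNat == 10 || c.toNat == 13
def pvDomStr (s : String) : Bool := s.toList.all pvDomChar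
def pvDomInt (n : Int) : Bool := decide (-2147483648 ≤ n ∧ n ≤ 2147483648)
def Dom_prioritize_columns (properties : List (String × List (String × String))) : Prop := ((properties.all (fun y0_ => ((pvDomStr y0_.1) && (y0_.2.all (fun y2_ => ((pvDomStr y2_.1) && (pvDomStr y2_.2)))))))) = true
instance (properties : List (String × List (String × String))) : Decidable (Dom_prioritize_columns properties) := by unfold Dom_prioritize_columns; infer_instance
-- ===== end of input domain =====

-- B replaces A's elif cascade and three-bucket distribution by an arithmetic rank (min of independent type- and name-rank tables) plus one stable sort (same cost, different decomposition).

-- ===== PORT A =====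
-- one loop pass, distributing each non-hidden property into one of three buckets
def pcStepA (acc : List String × List String × List String) (p : String × List (String × String)) :
    List String × List String × List String :=
  let t := PySem.Dict.getD (PySem.Dict.ofList p.2) "type" ""
  let nl := PySem.Str.lower p.1
  if t ∈ ["created_by", "last_edited_by", "created_time", "last_edited_time"] then acc
  else if t = "title" ∨ nl ∈ ["name", "title", "task", "item", "entry"] then
    (acc.1 ++ [p.1], acc.2.1, acc.2.2)
  else if t ∈ ["status", "select"] ∧ nl ∈ ["status", "state", "stage", "phase", "priority"] then
    (acc.1 ++ [p.1], acc.2.1, acc.2.2)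
  else if t ∈ ["date", "number", "checkbox", "people", "multi_select"] then
    (acc.1, acc.2.1 ++ [p.1], acc.2.2)
  else if nl ∈ ["assignee", "owner", "due", "deadline", "tags", "category", "type"] then
    (acc.1, acc.2.1 ++ [p.1], acc.2.2)
  else (acc.1, acc.2.1, acc.2.2 ++ [p.1])

def prioritize_columns (properties : List (String × List (String × String))) : List String :=
  let acc := (PySem.Dict.ofList properties).items.foldl pcStepA ([], [], [])
  acc.1 ++ acc.2.1 ++ acc.2.2

-- ===== PORT B =====
-- rank contributed by the property's type alone
def pcTypeRank (t : String) : Nat :=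
  if t = "title" then 0
  else if t ∈ ["date", "number", "checkbox", "people", "multi_select"] then 1
  else 2

-- rank contributed by the property's (lowercased) name, given the type
def pcNameRank (nl t : String) : Nat :=
  if nl ∈ ["name", "title", "task", "item", "entry"] then 0
  else if nl ∈ ["status", "state", "stage", "phase", "priority"] ∧ t ∈ ["status", "select"] then 0
  else if nl ∈ ["assignee", "owner", "due", "deadline", "tags", "category", "type"] then 1
  else 2

def prioritize_columns_alt (properties : List (String × List (String × String))) : List String :=
  let keyed := (PySem.Dict.ofList properties).items.foldl
    (fun ks p =>
      let t := PySem.Dict.getD (PySem.Dict.ofList p.2) "type" ""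
      if t ∈ ["created_by", "last_edited_by", "created_time", "last_edited_time"] then ks
      else ks ++ [(min (pcTypeRank t) (pcNameRank (PySem.Str.lower p.1) t), p.1)]) []
  (PySem.List.sorted keyed (fun q => q.1) false).map (fun q => q.2)

-- ===== PRECONDITION & SPEC =====
def Spec_prioritize_columns (properties : List (String × List (String × String))) (out : List String) : Prop := out = prioritize_columns_alt properties
instance (properties : List (String × List (String × String))) (out : List String) : Decidable (Spec_prioritize_columns properties out) := by unfold Spec_prioritize_columns; infer_instance

-- ===== CLAIM (what is proved, stated in full; the proofs are below) =====
def Claim_equal_prioritize_columns : Prop := ∀ (properties : List (String × List (String × String))), Dom_prioritize_columns properties → Spec_prioritize_columns properties (prioritize_columns properties)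

-- ===== LEMMAS AND PROOFS =====

-- B's per-property rank, factored out for the proofs
def pcRankB (p : String × List (String × String)) : Option Nat :=
  let t := PySem.Dict.getD (PySem.Dict.ofList p.2) "type" ""
  if t ∈ ["created_by", "last_edited_by", "created_time", "last_edited_time"] then none
  else some (min (pcTypeRank t) (pcNameRank (PySem.Str.lower p.1) t))

theorem pcRankB_lt_three (p : String × List (String × String)) (r : Nat)
    (h : pcRankB p = some r) : r < 3 := by
  simp only [pcRankB, pcTypeRank, pcNameRank] at h
  split_ifs at h <;> simp_all <;> omega

-- B's fold builds the keyed list by filterMap over pcRankB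
theorem foldB_eq_filterMap (ps : List (String × List (String × String))) :
    ∀ init : List (Nat × String),
    ps.foldl (fun ks p =>
        let t := PySem.Dict.getD (PySem.Dict.ofList p.2) "type" ""
        if t ∈ ["created_by", "last_edited_by", "created_time", "last_edited_time"] then ks
        else ks ++ [(min (pcTypeRank t) (pcNameRank (PySem.Str.lower p.1) t), p.1)]) init =
      init ++ ps.filterMap (fun p => (pcRankB p).map (fun r => (r, p.1))) := by
  induction ps with
  | nil => intro init; simp
  | cons p ps ih =>
    intro init
    simp only [List.foldl_cons]
    rw [ih]
    simp only [pcRankB, List.filterMap_cons]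
    split_ifs with h <;> simp

-- insertBy skips a prefix the element is not placed before
theorem insertBy_append_of_not_before {α : Type} (before : α → α → Bool) (x : α)
    (u v : List α) (h : ∀ y ∈ u, before x y = false) :
    PySem.List.insertBy before x (u ++ v) = u ++ PySem.List.insertBy before x v := by
  induction u with
  | nil => simp
  | cons y ys ih =>
    have hy : before x y = false := h y (by simp)
    simp only [List.cons_append, PySem.List.insertBy, hy]
    simp only [Bool.false_eq_true, if_false]
    rw [ih (fun z hz => h z (by simp [hz]))]

-- an element placed before everything goes to the front
theorem insertBy_of_forall_before {α : Type} (before : α → α → Bool) (x : α)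
    (v : List α) (h : ∀ y ∈ v, before x y = true) :
    PySem.List.insertBy before x v = x :: v := by
  cases v with
  | nil => rfl
  | cons y ys => simp [PySem.List.insertBy, h y (by simp)]

-- the insertion-sort fold over 0/1/2-keyed pairs keeps the three buckets concatenated
theorem foldl_insertBy_buckets (ks : List (Nat × String))
    (hk : ∀ q ∈ ks, q.1 < 3) :
    ∀ c0 c1 c2 : List (Nat × String),
      (∀ q ∈ c0, q.1 = 0) → (∀ q ∈ c1, q.1 = 1) → (∀ q ∈ c2, q.1 = 2) →
      ks.foldl (fun acc x => PySem.List.insertBy (fun a b => decide (a.1 < b.1)) x acc)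
          (c0 ++ c1 ++ c2) =
        (c0 ++ ks.filter (fun q => q.1 == 0)) ++ (c1 ++ ks.filter (fun q => q.1 == 1)) ++
          (c2 ++ ks.filter (fun q => q.1 == 2)) := by
  induction ks with
  | nil => intro c0 c1 c2 _ _ _; simp
  | cons q ks ih =>
    intro c0 c1 c2 h0 h1 h2
    have hq : q.1 < 3 := hk q (by simp)
    have hk' : ∀ p ∈ ks, p.1 < 3 := fun p hp => hk p (by simp [hp])
    simp only [List.foldl_cons]
    interval_cases h : q.1
    · -- rank 0: lands at the end of c0
      rw [List.append_assoc c0 c1 c2,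
        insertBy_append_of_not_before _ _ c0 (c1 ++ c2)
          (fun y hy => by simp [h0 y hy, h]),
        insertBy_of_forall_before _ _ (c1 ++ c2)
          (fun y hy => by
            rcases List.mem_append.1 hy with hy | hy
            · simp [h1 y hy, h]
            · simp [h2 y hy, h])]
      have := ih hk' (c0 ++ [q]) c1 c2
        (fun p hp => by rcases List.mem_append.1 hp with hp | hp
                        · exact h0 p hp
                        · simp at hp; simp [hp, h]) h1 h2
      simp only [List.append_assoc, List.cons_append, List.nil_append] at this ⊢
      rw [this]
      simp [h]
    · -- rank 1: lands at the end of c1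
      rw [List.append_assoc c0 c1 c2,
        insertBy_append_of_not_before _ _ c0 (c1 ++ c2)
          (fun y hy => by simp [h0 y hy, h]),
        insertBy_append_of_not_before _ _ c1 c2
          (fun y hy => by simp [h1 y hy, h]),
        insertBy_of_forall_before _ _ c2 (fun y hy => by simp [h2 y hy, h])]
      have := ih hk' c0 (c1 ++ [q]) c2 h0
        (fun p hp => by rcases List.mem_append.1 hp with hp | hp
                        · exact h1 p hp
                        · simp at hp; simp [hp, h]) h2
      simp only [List.append_assoc, List.cons_append, List.nil_append] at this ⊢
      rw [this]
      simp [h]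
    · -- rank 2: lands at the very end
      rw [List.append_assoc c0 c1 c2,
        insertBy_append_of_not_before _ _ c0 (c1 ++ c2)
          (fun y hy => by simp [h0 y hy, h]),
        insertBy_append_of_not_before _ _ c1 c2
          (fun y hy => by simp [h1 y hy, h]),
        PySem.List.insertBy_of_forall_not_before _ _ c2
          (fun y hy => by simp [h2 y hy, h])]
      have := ih hk' c0 c1 (c2 ++ [q]) h0 h1
        (fun p hp => by rcases List.mem_append.1 hp with hp | hp
                        · exact h2 p hp
                        · simp at hp; simp [hp, h])
      simp only [List.append_assoc, List.cons_append, List.nil_append] at this ⊢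
      rw [this]
      simp [h]

-- A's cascade step is pcRankB followed by the corresponding bucket append
theorem pcStepA_eq (acc : List String × List String × List String)
    (p : String × List (String × String)) :
    pcStepA acc p = match pcRankB p with
      | none => acc
      | some 0 => (acc.1 ++ [p.1], acc.2.1, acc.2.2)
      | some 1 => (acc.1, acc.2.1 ++ [p.1], acc.2.2)
      | some _ => (acc.1, acc.2.1, acc.2.2 ++ [p.1]) := by
  simp only [pcStepA, pcRankB, pcTypeRank, pcNameRank]
  split_ifs <;> simp_all

-- names of the properties whose rank is exactly i
def pcBucket (i : Nat) (properties : List (String × List (String × String))) : List String :=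
  properties.filterMap (fun p => if pcRankB p = some i then some p.1 else none)

-- A's fold computes the three rank buckets, appended to whatever is in the accumulator
theorem foldA_buckets (ps : List (String × List (String × String))) :
    ∀ hi med lo : List String,
      ps.foldl pcStepA (hi, med, lo) =
        (hi ++ pcBucket 0 ps, med ++ pcBucket 1 ps, lo ++ pcBucket 2 ps) := by
  induction ps with
  | nil => intro hi med lo; simp [pcBucket]
  | cons p ps ih =>
    intro hi med lo
    simp only [List.foldl_cons]
    rw [pcStepA_eq]
    cases h : pcRankB p with
    | none => simp [pcBucket, List.filterMap_cons, h, ih hi med lo]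
    | some r =>
      have hr3 := pcRankB_lt_three p r h
      match r, hr3 with
      | 0, _ => simp [pcBucket, List.filterMap_cons, h, ih (hi ++ [p.1]) med lo]
      | 1, _ => simp [pcBucket, List.filterMap_cons, h, ih hi (med ++ [p.1]) lo]
      | 2, _ => simp [pcBucket, List.filterMap_cons, h, ih hi med (lo ++ [p.1])]

-- the keyed list of B carries ranks < 3
theorem keyed_lt_three (ps : List (String × List (String × String))) :
    ∀ q ∈ ps.filterMap (fun p => (pcRankB p).map (fun r => (r, p.1))), q.1 < 3 := by
  intro q hq
  rcases List.mem_filterMap.1 hq with ⟨p, _, hp⟩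
  cases h : pcRankB p with
  | none => simp [h] at hp
  | some r =>
    simp [h] at hp
    subst hp
    exact pcRankB_lt_three _ _ h

-- filtering B's keyed list at rank i and dropping the keys is pcBucket i
theorem keyed_filter_eq_bucket (i : Nat) (ps : List (String × List (String × String))) :
    ((ps.filterMap (fun p => (pcRankB p).map (fun r => (r, p.1)))).filter
        (fun q => q.1 == i)).map (fun q => q.2) = pcBucket i ps := by
  induction ps with
  | nil => simp [pcBucket]
  | cons p ps ih =>
    simp only [pcBucket, List.filterMap_cons] at *
    cases h : pcRankB p with
    | none => simpa [h] using ih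
    | some r =>
      by_cases hr : r = i <;> simp [hr, ih]

-- ===== VERDICT (by name: the statement is the Claim_ definition above) =====
theorem prioritize_columns_spec : Claim_equal_prioritize_columns := by
  intro ps _
  simp only [Spec_prioritize_columns, prioritize_columns, prioritize_columns_alt]
  rw [foldB_eq_filterMap _ [], List.nil_append]
  rw [PySem.List.sorted_eq_foldl_insertBy]
  rw [show ([] : List (Nat × String)) = [] ++ [] ++ [] from rfl]
  rw [foldl_insertBy_buckets _ (keyed_lt_three _) [] [] []
    (by simp) (by simp) (by simp)]
  simp only [List.nil_append, List.map_append, keyed_filter_eq_bucket]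
  rw [foldA_buckets _ [] [] []]
  simp
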